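-- pv_equiv track=rewrite | github.com/matthewru/PythonLearning | AOPS_Intermediate_Python/Week2/ChallengeProblem5b.py | moneyList
-- ===== SOURCE A (Python) =====
-- def moneyList(coinList, maxAmount):
--     CoinNum = [0]
--
--     for amount in range(1, maxAmount + 1):
--         leastCoins = maxAmount
--         for coin in coinList:
--             if coin <= amount:
--                 neededCoins = 1 + CoinNum[amount - coin]
--                 if neededCoins < leastCoins:
--                     leastCoins = neededCoins
--         CoinNum.append(leastCoins)
--     return CoinNum
-- ===== SOURCE B (Python) =====
-- def moneyList(coinList, maxAmount):
--     # Top-down memoized version of the same capped recurrence.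
--     memo = {0: 0}
--
--     def best(amount):
--         if amount in memo:
--             return memo[amount]
--         least = maxAmount
--         for coin in coinList:
--             if 0 < coin <= amount:
--                 needed = 1 + best(amount - coin)
--                 if needed < least:
--                     least = needed
--         memo[amount] = least
--         return least
--
--     return [best(a) for a in range(max(maxAmount, 0) + 1)]
-- ===== Notes on version B (the rewrite author's own statement) =====
-- stated objective: alternative
-- what changed: B replaces A's bottom-up table append loop by a top-down memoized recursion best(amount) over a dict, evaluated for each amount; same capped recurrence, opposite direction.
import Mathlib
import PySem

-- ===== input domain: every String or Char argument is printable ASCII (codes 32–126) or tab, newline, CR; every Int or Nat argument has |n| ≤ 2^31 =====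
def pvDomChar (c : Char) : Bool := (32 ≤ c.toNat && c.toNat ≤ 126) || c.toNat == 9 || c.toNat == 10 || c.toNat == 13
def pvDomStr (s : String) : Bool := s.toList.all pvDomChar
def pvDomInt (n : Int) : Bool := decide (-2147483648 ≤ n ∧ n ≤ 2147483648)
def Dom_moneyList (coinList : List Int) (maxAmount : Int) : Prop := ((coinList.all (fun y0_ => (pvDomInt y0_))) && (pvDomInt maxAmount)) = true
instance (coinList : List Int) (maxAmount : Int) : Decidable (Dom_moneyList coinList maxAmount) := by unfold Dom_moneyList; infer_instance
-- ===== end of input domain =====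

-- B replaces A's bottom-up table construction by a top-down memoized recursion; same capped
-- recurrence, different direction/decomposition; no speed claim.

-- ===== PORT A =====
-- pyGet? returns none exactly where Python raises IndexError (excluded by Pre_); .getD 0 is
-- an arbitrary value on that excluded region only.
def moneyList (coinList : List Int) (maxAmount : Int) : List Int :=
  (PySem.List.pyRange 1 (maxAmount + 1) 1).foldl
    (fun CoinNum amount =>
      CoinNum ++ [coinList.foldl
        (fun leastCoins coin =>
          if coin ≤ amount then
            let neededCoins := 1 + (PySem.List.pyGet? CoinNum (amount - coin)).getD 0
            if neededCoins < leastCoins then neededCoins else leastCoins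
          else leastCoins) maxAmount])
    [0]

-- ===== PORT B =====
-- inner `for coin in coinList` loop of Source B's best(), with `step` the recursive call
def bestLoop (step : Int → PySem.Dict Int Int → Int × PySem.Dict Int Int) (amount : Int) :
    List Int → Int → PySem.Dict Int Int → Int × PySem.Dict Int Int
  | [], least, memo => (least, memo)
  | coin :: rest, least, memo =>
    if 0 < coin ∧ coin ≤ amount then
      let r := step (amount - coin) memo
      let needed := 1 + r.1
      bestLoop step amount rest (if needed < least then needed else least) r.2
    else bestLoop step amount rest least memo

-- Source B's best(amount), threading the memo dict; `fuel` is a pure totality guard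
-- (each recursive call strictly decreases the amount, so fuel = amount+1 is never exhausted).
def best (coinList : List Int) (maxAmount : Int) :
    Nat → Int → PySem.Dict Int Int → Int × PySem.Dict Int Int
  | fuel, amount, memo =>
    match memo.get? amount with
    | some v => (v, memo)
    | none =>
      match fuel with
      | 0 => (maxAmount, memo)  -- unreachable from moneyList_alt
      | fuel' + 1 =>
        let r := bestLoop (best coinList maxAmount fuel') amount coinList maxAmount memo
        (r.1, r.2.insert amount r.1)

def moneyList_alt (coinList : List Int) (maxAmount : Int) : List Int :=
  ((PySem.List.pyRange 0 (max maxAmount 0 + 1) 1).foldl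
    (fun (st : List Int × PySem.Dict Int Int) (a : Int) =>
      let r := best coinList maxAmount (a.toNat + 1) a st.2
      (st.1 ++ [r.1], r.2))
    (([] : List Int), PySem.Dict.ofList [((0 : Int), (0 : Int))])).1

-- ===== PRECONDITION & SPEC =====
-- Pre_ excludes exactly the inputs where A raises IndexError: maxAmount ≥ 1 together with a
-- non-positive coin (A then reads CoinNum[amount - coin] past the built prefix).
def Pre_moneyList (coinList : List Int) (maxAmount : Int) : Prop :=
  maxAmount ≤ 0 ∨ ∀ c ∈ coinList, 1 ≤ c
instance (coinList : List Int) (maxAmount : Int) : Decidable (Pre_moneyList coinList maxAmount) := by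
  unfold Pre_moneyList; infer_instance

def pvWitness_moneyList : List Int × Int := ([1, 2], 3)

def Spec_moneyList (coinList : List Int) (maxAmount : Int) (out : List Int) : Prop :=
  out = moneyList_alt coinList maxAmount
instance (coinList : List Int) (maxAmount : Int) (out : List Int) : Decidable (Spec_moneyList coinList maxAmount out) := by
  unfold Spec_moneyList; infer_instance

-- ===== CLAIM (what is proved, stated in full; the proofs are below) =====
def Claim_equal_moneyList : Prop := ∀ (coinList : List Int) (maxAmount : Int), Dom_moneyList coinList maxAmount → Pre_moneyList coinList maxAmount → Spec_moneyList coinList maxAmount (moneyList coinList maxAmount)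


-- ===== LEMMAS AND PROOFS =====

-- Reference table: gList c M k = A's CoinNum after processing amounts 1..k.
def gList (c : List Int) (M : Int) : Nat → List Int
  | 0 => [0]
  | k + 1 =>
    let L := gList c M k
    L ++ [c.foldl
      (fun leastCoins coin =>
        if coin ≤ ((k : Int) + 1) then
          let neededCoins := 1 + (PySem.List.pyGet? L (((k : Int) + 1) - coin)).getD 0
          if neededCoins < leastCoins then neededCoins else leastCoins
        else leastCoins) M]

def g (c : List Int) (M : Int) (k : Nat) : Int := (gList c M k).getD k 0

-- pure version of the inner fold, in terms of g
def F (c : List Int) (M : Int) (a : Int) (least coin : Int) : Int :=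
  if coin ≤ a then
    let needed := 1 + g c M (a - coin).toNat
    if needed < least then needed else least
  else least

def MemoOK (c : List Int) (M : Int) (memo : PySem.Dict Int Int) : Prop :=
  ∀ k v, memo.get? k = some v → 0 ≤ k ∧ v = g c M k.toNat

lemma gList_length (c : List Int) (M : Int) : ∀ n, (gList c M n).length = n + 1 := by
  intro n; induction n with
  | zero => rfl
  | succ k ih => simp [gList, ih]

lemma gList_get (c : List Int) (M : Int) : ∀ n k, k ≤ n → (gList c M n).getD k 0 = g c M k := by
  intro n
  induction n with
  | zero => intro k hk; interval_cases k; rfl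
  | succ n ih =>
    intro k hk
    by_cases hk' : k ≤ n
    · have hlen : k < (gList c M n).length := by rw [gList_length]; omega
      calc (gList c M (n + 1)).getD k 0
          = (gList c M n).getD k 0 := by
            conv_lhs => rw [gList]
            exact List.getD_append _ _ _ _ hlen
        _ = g c M k := ih k hk'
    · have : k = n + 1 := by omega
      subst this; rfl

lemma g_succ (c : List Int) (M : Int) (n : Nat) :
    g c M (n + 1) = c.foldl
      (fun leastCoins coin =>
        if coin ≤ ((n : Int) + 1) then
          let neededCoins := 1 + (PySem.List.pyGet? (gList c M n) (((n : Int) + 1) - coin)).getD 0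
          if neededCoins < leastCoins then neededCoins else leastCoins
        else leastCoins) M := by
  unfold g
  conv_lhs => rw [gList]
  rw [List.getD_eq_getElem?_getD,
    show n + 1 = (gList c M n).length from (gList_length c M n).symm,
    List.getElem?_concat_length]
  rfl

lemma gList_succ (c : List Int) (M : Int) (n : Nat) :
    gList c M (n + 1) = gList c M n ++ [g c M (n + 1)] := by
  rw [g_succ]; rfl

lemma moneyList_eq_gList (c : List Int) (M : Int) (hM : 0 ≤ M) :
    moneyList c M = gList c M M.toNat := by
  have key : ∀ m : Nat,
      (PySem.List.pyRange 1 ((m : Int) + 1) 1).foldl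
        (fun CoinNum amount =>
          CoinNum ++ [c.foldl
            (fun leastCoins coin =>
              if coin ≤ amount then
                let neededCoins := 1 + (PySem.List.pyGet? CoinNum (amount - coin)).getD 0
                if neededCoins < leastCoins then neededCoins else leastCoins
              else leastCoins) M])
        [0] = gList c M m := by
    intro m
    induction m with
    | zero =>
      rw [show ((0 : Nat) : Int) + 1 = 1 by norm_num, PySem.List.pyRange_one_eq_nil le_rfl]
      rfl
    | succ m ih =>
      rw [show ((m + 1 : Nat) : Int) + 1 = ((m : Int) + 1) + 1 by push_cast; ring,
        PySem.List.pyRange_one_succ_right (by omega),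
        List.foldl_append, ih, List.foldl_cons, List.foldl_nil, gList_succ, g_succ]
  unfold moneyList
  rw [show M + 1 = ((M.toNat : Nat) : Int) + 1 by omega]
  exact key M.toNat

lemma foldl_F_eq_g (c : List Int) (M : Int) (hc : ∀ x ∈ c, 1 ≤ x) (a : Int) (ha : 1 ≤ a) :
    c.foldl (F c M a) M = g c M a.toNat := by
  obtain ⟨k, hk⟩ : ∃ k : Nat, a.toNat = k + 1 := ⟨a.toNat - 1, by omega⟩
  have hak : a = (k : Int) + 1 := by omega
  rw [hk, g_succ]
  apply PySem.List.foldl_congr_mem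
  intro least x hx
  have hx1 : 1 ≤ x := hc x hx
  by_cases hxa : x ≤ (k : Int) + 1
  · have h0 : 0 ≤ (k : Int) + 1 - x := by omega
    have hlt : ((k : Int) + 1 - x).toNat < (gList c M k).length := by
      rw [gList_length]; omega
    have hget : (PySem.List.pyGet? (gList c M k) ((k : Int) + 1 - x)).getD 0
        = g c M (((k : Int) + 1 - x).toNat) := by
      rw [PySem.List.pyGet?_of_nonneg _ h0, List.getElem?_eq_getElem hlt]
      rw [Option.getD_some, ← List.getD_eq_getElem _ 0 hlt]
      exact gList_get c M k _ (by rw [gList_length] at hlt; omega)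
    simp only [F, hak, hxa, hget]
  · simp only [F, hak, if_neg hxa]

lemma bestLoop_ok (c : List Int) (M : Int) (a : Int)
    (step : Int → PySem.Dict Int Int → Int × PySem.Dict Int Int)
    (hstep : ∀ b memo', 0 ≤ b → b < a → MemoOK c M memo' → memo'.get? 0 = some 0 →
      (step b memo').1 = g c M b.toNat ∧ MemoOK c M (step b memo').2 ∧
      (step b memo').2.get? 0 = some 0) :
    ∀ coins least memo, (∀ x ∈ coins, 1 ≤ x) → MemoOK c M memo → memo.get? 0 = some 0 →
      (bestLoop step a coins least memo).1 = coins.foldl (F c M a) least ∧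
      MemoOK c M (bestLoop step a coins least memo).2 ∧
      (bestLoop step a coins least memo).2.get? 0 = some 0 := by
  intro coins
  induction coins with
  | nil => intro least memo _ hm h0; exact ⟨rfl, hm, h0⟩
  | cons coin rest ih =>
    intro least memo hcs hm h0
    have hcoin : 1 ≤ coin := hcs coin (List.mem_cons_self ..)
    have hrest : ∀ x ∈ rest, 1 ≤ x := fun x hx => hcs x (List.mem_cons_of_mem _ hx)
    by_cases hca : coin ≤ a
    · have hcond : 0 < coin ∧ coin ≤ a := ⟨by omega, hca⟩
      obtain ⟨hr1, hr2, hr3⟩ := hstep (a - coin) memo (by omega) (by omega) hm h0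
      have hF : F c M a least coin
          = if 1 + (step (a - coin) memo).1 < least then 1 + (step (a - coin) memo).1 else least := by
        rw [hr1]; simp only [F, if_pos hca]
      rw [show bestLoop step a (coin :: rest) least memo
          = bestLoop step a rest
              (if 1 + (step (a - coin) memo).1 < least then 1 + (step (a - coin) memo).1 else least)
              (step (a - coin) memo).2 by simp [bestLoop, hcond]]
      rw [List.foldl_cons, ← hF]
      exact ih _ _ hrest hr2 hr3
    · have hcond : ¬ (0 < coin ∧ coin ≤ a) := by intro h; exact hca h.2
      rw [show bestLoop step a (coin :: rest) least memo = bestLoop step a rest least memo by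
        simp [bestLoop, hcond]]
      rw [List.foldl_cons, show F c M a least coin = least by simp [F, hca]]
      exact ih _ _ hrest hm h0

lemma best_ok (c : List Int) (M : Int) (hc : ∀ x ∈ c, 1 ≤ x) :
    ∀ fuel a memo, 0 ≤ a → a.toNat < fuel → MemoOK c M memo → memo.get? 0 = some 0 →
      (best c M fuel a memo).1 = g c M a.toNat ∧ MemoOK c M (best c M fuel a memo).2 ∧
      (best c M fuel a memo).2.get? 0 = some 0 := by
  intro fuel
  induction fuel with
  | zero => intro a memo _ h; omega
  | succ fuel ih =>
    intro a memo ha hfa hm h0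
    cases hget : memo.get? a with
    | some v =>
      rw [show best c M (fuel + 1) a memo = (v, memo) by simp [best, hget]]
      obtain ⟨_, hv⟩ := hm a v hget
      exact ⟨hv, hm, h0⟩
    | none =>
      have ha1 : 1 ≤ a := by
        rcases lt_or_eq_of_le ha with h | h
        · omega
        · exfalso; rw [← h] at hget; rw [h0] at hget; simp at hget
      have hstep : ∀ b memo', 0 ≤ b → b < a → MemoOK c M memo' → memo'.get? 0 = some 0 →
          (best c M fuel b memo').1 = g c M b.toNat ∧ MemoOK c M (best c M fuel b memo').2 ∧
          (best c M fuel b memo').2.get? 0 = some 0 := by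
        intro b memo' hb hba hm' h0'
        exact ih b memo' hb (by omega) hm' h0'
      obtain ⟨hl1, hl2, hl3⟩ :=
        bestLoop_ok c M a (best c M fuel) hstep c M memo hc hm h0
      have hval : (bestLoop (best c M fuel) a c M memo).1 = g c M a.toNat := by
        rw [hl1]; exact foldl_F_eq_g c M hc a ha1
      rw [show best c M (fuel + 1) a memo
          = ((bestLoop (best c M fuel) a c M memo).1,
             (bestLoop (best c M fuel) a c M memo).2.insert a
               (bestLoop (best c M fuel) a c M memo).1) by simp [best, hget]]
      refine ⟨hval, ?_, ?_⟩
      · intro k v hkv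
        rw [PySem.Dict.get?_insert] at hkv
        by_cases hka : k = a
        · rw [if_pos hka] at hkv
          refine ⟨hka ▸ ha, ?_⟩
          cases hkv; rw [hval, hka]
        · rw [if_neg hka] at hkv
          exact hl2 k v hkv
      · rw [PySem.Dict.get?_insert, if_neg (by omega)]
        exact hl3

lemma memo0_get (k : Int) :
    (PySem.Dict.ofList [((0 : Int), (0 : Int))]).get? k = if k = 0 then some 0 else none := by
  simp [PySem.Dict.ofList, PySem.Dict.update, PySem.Dict.get?_insert]

lemma memo0_ok (c : List Int) (M : Int) :
    MemoOK c M (PySem.Dict.ofList [((0 : Int), (0 : Int))]) := by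
  intro k v h
  rw [memo0_get] at h
  by_cases hk : k = 0
  · rw [if_pos hk] at h
    cases h
    exact ⟨by omega, by subst hk; rfl⟩
  · rw [if_neg hk] at h; simp at h

lemma gList_eq_map (c : List Int) (M : Int) :
    ∀ n, gList c M n = (List.range (n + 1)).map (g c M) := by
  intro n
  induction n with
  | zero => rfl
  | succ n ih => rw [gList_succ, ih]; simp [List.range_succ]

lemma outer_ok (c : List Int) (M : Int) (hc : ∀ x ∈ c, 1 ≤ x) :
    ∀ j : Nat,
      ((PySem.List.pyRange 0 (j : Int) 1).foldl
        (fun (st : List Int × PySem.Dict Int Int) (a : Int) =>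
          let r := best c M (a.toNat + 1) a st.2
          (st.1 ++ [r.1], r.2))
        (([] : List Int), PySem.Dict.ofList [((0 : Int), (0 : Int))])).1
        = (List.range j).map (g c M)
      ∧ MemoOK c M (((PySem.List.pyRange 0 (j : Int) 1).foldl
        (fun (st : List Int × PySem.Dict Int Int) (a : Int) =>
          let r := best c M (a.toNat + 1) a st.2
          (st.1 ++ [r.1], r.2))
        (([] : List Int), PySem.Dict.ofList [((0 : Int), (0 : Int))])).2)
      ∧ (((PySem.List.pyRange 0 (j : Int) 1).foldl
        (fun (st : List Int × PySem.Dict Int Int) (a : Int) =>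
          let r := best c M (a.toNat + 1) a st.2
          (st.1 ++ [r.1], r.2))
        (([] : List Int), PySem.Dict.ofList [((0 : Int), (0 : Int))])).2).get? 0 = some 0 := by
  intro j
  induction j with
  | zero =>
    rw [show ((0 : Nat) : Int) = 0 from rfl, PySem.List.pyRange_one_eq_nil le_rfl]
    exact ⟨rfl, memo0_ok c M, memo0_get 0⟩
  | succ j ih =>
    obtain ⟨h1, h2, h3⟩ := ih
    rw [show ((j + 1 : Nat) : Int) = (j : Int) + 1 by push_cast; ring,
      PySem.List.pyRange_one_succ_right (by positivity), List.foldl_append,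
      List.foldl_cons, List.foldl_nil]
    obtain ⟨hb1, hb2, hb3⟩ := best_ok c M hc ((j : Int).toNat + 1) (j : Int) _
      (by positivity) (by omega) h2 h3
    refine ⟨?_, hb2, hb3⟩
    rw [List.range_succ, List.map_append]
    exact congrArg₂ (· ++ ·) h1 (congrArg (fun x => [x]) (by simpa using hb1))

lemma alt_eq_gList (c : List Int) (M : Int) (hc : ∀ x ∈ c, 1 ≤ x) :
    moneyList_alt c M = gList c M M.toNat := by
  unfold moneyList_alt
  rw [show max M 0 + 1 = ((M.toNat + 1 : Nat) : Int) by omega]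
  rw [(outer_ok c M hc (M.toNat + 1)).1, gList_eq_map]

-- both programs return [0] when maxAmount ≤ 0
lemma both_trivial (c : List Int) (M : Int) (hM : M ≤ 0) :
    moneyList c M = [0] ∧ moneyList_alt c M = [0] := by
  constructor
  · unfold moneyList
    rw [PySem.List.pyRange_one_eq_nil (by omega)]
    rfl
  · unfold moneyList_alt
    rw [show max M 0 + 1 = ((1 : Nat) : Int) by omega,
      show ((1 : Nat) : Int) = 0 + 1 from rfl, PySem.List.pyRange_one_succ_right le_rfl,
      PySem.List.pyRange_one_eq_nil le_rfl]
    simp only [List.nil_append, List.foldl_cons, List.foldl_nil]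
    rw [show best c M ((0 : Int).toNat + 1) 0 (PySem.Dict.ofList [((0 : Int), (0 : Int))])
        = (0, PySem.Dict.ofList [((0 : Int), (0 : Int))]) by simp [best, memo0_get]]

-- ===== VERDICT (by name: the statement is the Claim_ definition above) =====
theorem moneyList_spec : Claim_equal_moneyList := by
  intro c M _ hpre
  unfold Spec_moneyList
  by_cases hM : M ≤ 0
  · obtain ⟨hA, hB⟩ := both_trivial c M hM
    rw [hA, hB]
  · have hc : ∀ x ∈ c, 1 ≤ x := by
      rcases hpre with h | h
      · omega
      · exact h
    rw [moneyList_eq_gList c M (by omega), alt_eq_gList c M hc]
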